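-- pv_equiv track=rewrite | github.com/MobileTeleSystems/Ambrosia | ambrosia/tools/split_tools.py | make_labels_for_groups
-- ===== SOURCE A (Python) =====
-- from typing import Any, Callable, Dict, Iterable, List, Optional, Sequence, Tuple, Union
--
-- def make_labels_for_groups(groups_number: int) -> List[str]:
--     """
--     Build list with labels for groups.
--
--     Parameters
--     ----------
--     groups_number : int
--         Groups number for splitting.
--
--     Returns
--     -------
--     List with labels len(result) = groups_number.
--     """
--     alphabet_size: int = ord("Z") - ord("A") + 1
--     if 2 * alphabet_size < groups_number:
--         raise NotImplementedError("Groups number should be <= 52")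
--     if groups_number <= alphabet_size:
--         return [chr(ord("A") + j) for j in range(groups_number)]
--     else:
--         first_part: List[str] = [chr(ord("A") + j) for j in range(alphabet_size)]
--         second_part: List[str] = [chr(ord("a") + j) for j in range(groups_number - alphabet_size)]
--         return first_part + second_part
-- ===== SOURCE B (Python) =====
-- ALPHABET = "ABCDEFGHIJKLMNOPQRSTUVWXYZabcdefghijklmnopqrstuvwxyz"
--
-- def make_labels_for_groups(groups_number: int):
--     if groups_number > len(ALPHABET):
--         raise NotImplementedError("Groups number should be <= 52")
--     return [ALPHABET[i] for i in range(groups_number)]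
-- ===== Notes on version B (the rewrite author's own statement) =====
-- stated objective: idiomatic
-- what changed: Replaces the <=26 / >26 case split with its two chr-arithmetic comprehensions and list concatenation by one precomputed 52-letter table indexed in a single comprehension over range(groups_number).
import Mathlib
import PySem

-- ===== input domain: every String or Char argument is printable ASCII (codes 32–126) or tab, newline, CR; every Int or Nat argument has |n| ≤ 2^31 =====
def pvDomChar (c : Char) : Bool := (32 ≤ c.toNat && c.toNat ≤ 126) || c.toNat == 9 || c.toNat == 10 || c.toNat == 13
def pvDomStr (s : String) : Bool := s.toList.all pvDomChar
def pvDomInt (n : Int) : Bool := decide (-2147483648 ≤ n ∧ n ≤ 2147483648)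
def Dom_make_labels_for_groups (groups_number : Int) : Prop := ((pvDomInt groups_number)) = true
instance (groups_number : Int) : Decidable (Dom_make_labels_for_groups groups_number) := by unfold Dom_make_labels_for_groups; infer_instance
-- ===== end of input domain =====

-- B replaces A's two-branch chr-arithmetic construction by one precomputed 52-letter table
-- indexed in a single comprehension (idiomatic; same cost).

-- ===== PORT A =====
def make_labels_for_groups (groups_number : Int) : List String :=
  let alphabet_size : Int := (90 : Int) - 65 + 1   -- ord("Z") - ord("A") + 1
  if 2 * alphabet_size < groups_number then []      -- raise NotImplementedError (excluded by Pre_)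
  else if groups_number ≤ alphabet_size then
    (PySem.List.pyRange 0 groups_number 1).map (fun j => String.singleton (Char.ofNat (65 + j).toNat))
  else
    ((PySem.List.pyRange 0 alphabet_size 1).map (fun j => String.singleton (Char.ofNat (65 + j).toNat))) ++
    ((PySem.List.pyRange 0 (groups_number - alphabet_size) 1).map (fun j => String.singleton (Char.ofNat (97 + j).toNat)))

-- ===== PORT B =====
def pvAlphabet : String := "ABCDEFGHIJKLMNOPQRSTUVWXYZabcdefghijklmnopqrstuvwxyz"

def make_labels_for_groups_alt (groups_number : Int) : List String :=
  if groups_number > (PySem.Str.len pvAlphabet : Int) then []   -- raise NotImplementedError (excluded by Pre_)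
  else (PySem.List.pyRange 0 groups_number 1).map
    (fun i => ((PySem.Str.pyGet? pvAlphabet i).map String.singleton).getD "")   -- index always in range here, so getD default unreachable

-- ===== PRECONDITION & SPEC =====
-- A raises NotImplementedError for groups_number > 52; exactly those inputs are excluded.
def Pre_make_labels_for_groups (groups_number : Int) : Prop := groups_number ≤ 52
instance (groups_number : Int) : Decidable (Pre_make_labels_for_groups groups_number) := by unfold Pre_make_labels_for_groups; infer_instance
def pvWitness_make_labels_for_groups : Int := 5

def Spec_make_labels_for_groups (groups_number : Int) (out : List String) : Prop := out = make_labels_for_groups_alt groups_number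
instance (groups_number : Int) (out : List String) : Decidable (Spec_make_labels_for_groups groups_number out) := by unfold Spec_make_labels_for_groups; infer_instance

-- ===== CLAIM (what is proved, stated in full; the proofs are below) =====
def Claim_equal_make_labels_for_groups : Prop := ∀ (groups_number : Int), Dom_make_labels_for_groups groups_number → Pre_make_labels_for_groups groups_number → Spec_make_labels_for_groups groups_number (make_labels_for_groups groups_number)

-- ===== LEMMAS AND PROOFS =====

-- ===== VERDICT (by name: the statement is the Claim_ definition above) =====
theorem make_labels_for_groups_spec : Claim_equal_make_labels_for_groups := by
  intro n _ hpre
  unfold Spec_make_labels_for_groups make_labels_for_groups make_labels_for_groups_alt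
  unfold Pre_make_labels_for_groups at hpre
  by_cases h0 : n ≤ 0
  · rw [PySem.List.pyRange_one_eq_nil h0]
    have h52 : (PySem.Str.len pvAlphabet : Int) = 52 := by decide
    simp only [List.map_nil, h52]
    split_ifs <;> first | rfl | omega
  · push Not at h0
    interval_cases n <;> decide
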